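-- pv_equiv track=rewrite | github.com/pkanumula/Leetcode | 2320-find-all-k-distant-indices-in-an-array/2320-find-all-k-distant-indices-in-an-array.py | findKDistantIndices
-- ===== SOURCE A (Python) =====
-- from typing import List
--
-- def findKDistantIndices(nums: List[int], key: int, k: int) -> List[int]:
--     n = len(nums)
--     result = set()
--
--     # Step 1: Identify all indices where nums[j] == key
--     key_indices = [i for i, val in enumerate(nums) if val == key]
--
--     # Step 2: For each key index, add all indices within distance k
--     for j in key_indices:
--         start = max(0, j - k)
--         end = min(n - 1, j + k)
--         for i in range(start, end + 1):
--             result.add(i)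
--
--     # Step 3: Return the sorted list
--     return sorted(result)
-- ===== SOURCE B (Python) =====
-- def findKDistantIndices(nums, key, k):
--     # One-pass interval merge: intervals [j-k, j+k] arrive with increasing j,
--     # so emit each clipped to [nxt, n-1] and advance nxt; output is already sorted.
--     n = len(nums)
--     res = []
--     nxt = 0
--     for j, v in enumerate(nums):
--         if v == key:
--             for i in range(max(nxt, j - k), min(n - 1, j + k) + 1):
--                 res.append(i)
--             nxt = max(nxt, j + k + 1)
--     return res
-- ===== Notes on version B (the rewrite author's own statement) =====
-- stated objective: alternative
-- what changed: B replaces A's set-accumulation of every in-range index followed by a sort with a single left-to-right interval merge over key occurrences that emits the result already sorted.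
import Mathlib
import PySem

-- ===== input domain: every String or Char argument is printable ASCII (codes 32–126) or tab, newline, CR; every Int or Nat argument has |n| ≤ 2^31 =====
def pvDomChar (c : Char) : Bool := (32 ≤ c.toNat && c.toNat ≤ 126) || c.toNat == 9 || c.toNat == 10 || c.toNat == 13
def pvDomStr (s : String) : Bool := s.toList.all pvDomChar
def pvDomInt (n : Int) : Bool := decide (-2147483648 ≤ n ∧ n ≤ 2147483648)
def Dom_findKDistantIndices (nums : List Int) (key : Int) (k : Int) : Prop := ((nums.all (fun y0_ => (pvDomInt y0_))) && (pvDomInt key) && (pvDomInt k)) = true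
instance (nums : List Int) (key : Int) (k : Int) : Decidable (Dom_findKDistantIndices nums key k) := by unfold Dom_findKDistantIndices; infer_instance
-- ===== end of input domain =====

-- B replaces A's "collect every index into a set, then sort" with a single left-to-right
-- interval merge that emits the answer already sorted in one pass (objective: alternative).

-- ===== PORT A =====
def findKDistantIndices (nums : List Int) (key : Int) (k : Int) : List Int :=
  let n : Int := nums.length
  -- key_indices = [i for i, val in enumerate(nums) if val == key]
  let key_indices : List Int :=
    (PySem.List.enumerate nums).filterMap (fun p => if p.2 = key then some p.1 else none)
  -- for j in key_indices: for i in range(start, end+1): result.add(i)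
  let result : PySem.Set Int :=
    key_indices.foldl
      (fun (result : PySem.Set Int) j =>
        (PySem.List.pyRange (max 0 (j - k)) (min (n - 1) (j + k) + 1) 1).foldl
          PySem.Set.add result)
      PySem.Set.empty
  PySem.List.sorted result (fun x => x)

-- ===== PORT B =====
def findKDistantIndices_alt (nums : List Int) (key : Int) (k : Int) : List Int :=
  let n : Int := nums.length
  -- one pass: emit each key interval clipped to [nxt, n-1], advance nxt
  let st : List Int × Int :=
    (PySem.List.enumerate nums).foldl
      (fun (st : List Int × Int) p =>
        if p.2 = key then
          (st.1 ++ PySem.List.pyRange (max st.2 (p.1 - k)) (min (n - 1) (p.1 + k) + 1) 1,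
           max st.2 (p.1 + k + 1))
        else st)
      ([], 0)
  st.1

-- ===== PRECONDITION & SPEC =====
def Spec_findKDistantIndices (nums : List Int) (key : Int) (k : Int) (out : List Int) : Prop := out = findKDistantIndices_alt nums key k
instance (nums : List Int) (key : Int) (k : Int) (out : List Int) : Decidable (Spec_findKDistantIndices nums key k out) := by unfold Spec_findKDistantIndices; infer_instance

-- ===== CLAIM (what is proved, stated in full; the proofs are below) =====
def Claim_equal_findKDistantIndices : Prop := ∀ (nums : List Int) (key : Int) (k : Int), Dom_findKDistantIndices nums key k → Spec_findKDistantIndices nums key k (findKDistantIndices nums key k)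

-- ===== LEMMAS AND PROOFS =====

-- B's guarded fold over enumerate(nums) is a fold over the list of key indices.
theorem pv_foldl_if_filterMap {σ : Type} (key : Int) (g : σ → Int → σ) :
    ∀ (l : List (Int × Int)) (st : σ),
      l.foldl (fun st p => if p.2 = key then g st p.1 else st) st
        = (l.filterMap (fun p => if p.2 = key then some p.1 else none)).foldl g st := by
  intro l
  induction l with
  | nil => intro st; rfl
  | cons p l ih =>
    intro st
    by_cases h : p.2 = key <;> simp [h, ih]

-- membership in A's set-building fold
theorem pv_mem_foldl_update (r : Int → List Int) :
    ∀ (js : List Int) (s : PySem.Set Int) (x : Int),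
      (x ∈ js.foldl (fun (s : PySem.Set Int) j => (r j).foldl PySem.Set.add s) s
        ↔ x ∈ s ∨ ∃ j ∈ js, x ∈ r j) := by
  intro js
  induction js with
  | nil => simp
  | cons j js ih =>
    intro s x
    simp only [List.foldl_cons, ih]
    have h1 : (r j).foldl PySem.Set.add s = PySem.Set.update s (r j) := rfl
    rw [h1, PySem.Set.mem_update]
    constructor
    · rintro ((h | h) | ⟨j', hj', hm⟩)
      · exact Or.inl h
      · exact Or.inr ⟨j, by simp, h⟩
      · exact Or.inr ⟨j', by simp [hj'], hm⟩
    · rintro (h | ⟨j', hj', hm⟩)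
      · exact Or.inl (Or.inl h)
      · rcases List.mem_cons.mp hj' with h' | h'
        · exact Or.inl (Or.inr (h' ▸ hm))
        · exact Or.inr ⟨j', h', hm⟩

theorem pv_nodup_foldl_update (r : Int → List Int) :
    ∀ (js : List Int) (s : PySem.Set Int), s.Nodup →
      (js.foldl (fun (s : PySem.Set Int) j => (r j).foldl PySem.Set.add s) s).Nodup := by
  intro js
  induction js with
  | nil => intro s hs; exact hs
  | cons j js ih =>
    intro s hs
    exact ih _ (PySem.Set.nodup_update s (r j) hs)

-- the key indices form a strictly increasing sublist of range(len(nums))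
theorem pv_filterMap_fst_sublist (key : Int) :
    ∀ (l : List (Int × Int)),
      (l.filterMap (fun p => if p.2 = key then some p.1 else none)).Sublist (l.map Prod.fst) := by
  intro l
  induction l with
  | nil => simp
  | cons p l ih =>
    by_cases h : p.2 = key
    · simpa [h] using ih.cons₂ p.1
    · simpa [h] using ih.cons p.1

-- B's interval-merge loop: invariant and output characterisation
theorem pv_bloop (n k : Int)
    (g : List Int × Int → Int → List Int × Int)
    (hg : g = fun st j =>
      (st.1 ++ PySem.List.pyRange (max st.2 (j - k)) (min (n - 1) (j + k) + 1) 1,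
       max st.2 (j + k + 1))) :
    ∀ (js : List Int) (res : List Int) (nxt : Int),
      js.Pairwise (· < ·) →
      (∀ j ∈ js, 0 ≤ j ∧ j < n) →
      res.Pairwise (· < ·) →
      (∀ x ∈ res, x < nxt) →
      0 ≤ nxt →
      (∀ y, 0 ≤ y → y ≤ n - 1 → y < nxt → (∃ j ∈ js, j - k ≤ y ∧ y ≤ j + k) → y ∈ res) →
      (js.foldl g (res, nxt)).1.Pairwise (· < ·) ∧
      (∀ x, x ∈ (js.foldl g (res, nxt)).1 ↔
        x ∈ res ∨ (0 ≤ x ∧ x ≤ n - 1 ∧ ∃ j ∈ js, j - k ≤ x ∧ x ≤ j + k)) := by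
  intro js
  induction js with
  | nil =>
    intro res nxt _ _ hres _ _ _
    simp [hres]
  | cons j js ih =>
    intro res nxt hsort hrange hres hlt hnn hcov
    have hj : 0 ≤ j ∧ j < n := hrange j (by simp)
    have hjlt : ∀ j' ∈ js, j < j' := fun j' h => (List.pairwise_cons.mp hsort).1 j' h
    have hstep : (j :: js).foldl g (res, nxt) = js.foldl g (g (res, nxt) j) := rfl
    set res' := res ++ PySem.List.pyRange (max nxt (j - k)) (min (n - 1) (j + k) + 1) 1 with hres'
    have hgv : g (res, nxt) j = (res', max nxt (j + k + 1)) := by rw [hg]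
    -- new state invariants
    have hres'_pw : res'.Pairwise (· < ·) := by
      rw [hres', List.pairwise_append]
      refine ⟨hres, PySem.List.pairwise_lt_pyRange_one _ _, ?_⟩
      intro x hx y hy
      have h1 := hlt x hx
      have h2 := (PySem.List.mem_pyRange_one).mp hy
      omega
    have hlt' : ∀ x ∈ res', x < max nxt (j + k + 1) := by
      intro x hx
      rcases List.mem_append.mp hx with h | h
      · have := hlt x h; omega
      · have := (PySem.List.mem_pyRange_one).mp h; omega
    have hcov' : ∀ y, 0 ≤ y → y ≤ n - 1 → y < max nxt (j + k + 1) →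
        (∃ j' ∈ js, j' - k ≤ y ∧ y ≤ j' + k) → y ∈ res' := by
      rintro y hy0 hy1 hy2 ⟨j', hj', hy3, hy4⟩
      by_cases hc : y < nxt
      · exact List.mem_append.mpr (Or.inl (hcov y hy0 hy1 hc ⟨j', by simp [hj'], hy3, hy4⟩))
      · refine List.mem_append.mpr (Or.inr ?_)
        rw [PySem.List.mem_pyRange_one]
        have := hjlt j' hj'
        omega
    have hmain := ih res' (max nxt (j + k + 1)) (List.pairwise_cons.mp hsort).2
      (fun j' h => hrange j' (by simp [h])) hres'_pw hlt' (by omega) hcov'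
    rw [hstep, hgv]
    refine ⟨hmain.1, ?_⟩
    intro x
    rw [hmain.2 x]
    constructor
    · rintro (h | ⟨h0, h1, j', hj', h3, h4⟩)
      · rcases List.mem_append.mp h with h | h
        · exact Or.inl h
        · have := (PySem.List.mem_pyRange_one).mp h
          exact Or.inr ⟨by omega, by omega, j, by simp, by omega, by omega⟩
      · exact Or.inr ⟨h0, h1, j', by simp [hj'], h3, h4⟩
    · rintro (h | ⟨h0, h1, j', hj', h3, h4⟩)
      · exact Or.inl (List.mem_append.mpr (Or.inl h))
      · rcases List.mem_cons.mp hj' with rfl | hmem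
        · by_cases hc : x < nxt
          · exact Or.inl (List.mem_append.mpr (Or.inl
              (hcov x h0 h1 hc ⟨j', by simp, h3, h4⟩)))
          · refine Or.inl (List.mem_append.mpr (Or.inr ?_))
            rw [PySem.List.mem_pyRange_one]
            omega
        · exact Or.inr ⟨h0, h1, j', hmem, h3, h4⟩

-- ===== VERDICT (by name: the statement is the Claim_ definition above) =====
theorem findKDistantIndices_spec : Claim_equal_findKDistantIndices := by
  intro nums key k _
  unfold Spec_findKDistantIndices findKDistantIndices findKDistantIndices_alt
  simp only []
  set n : Int := (nums.length : Int) with hn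
  set js : List Int :=
    (PySem.List.enumerate nums).filterMap (fun p => if p.2 = key then some p.1 else none) with hjs
  -- facts about the key indices
  have hsub : js.Sublist ((PySem.List.enumerate nums).map Prod.fst) :=
    pv_filterMap_fst_sublist key _
  have hmapfst : (PySem.List.enumerate nums).map Prod.fst = PySem.List.pyRange 0 n 1 := by
    have := PySem.List.map_fst_enumerate nums 0
    simpa using this
  have hjs_pw : js.Pairwise (· < ·) := by
    refine List.Pairwise.sublist hsub ?_
    rw [hmapfst]; exact PySem.List.pairwise_lt_pyRange_one 0 n
  have hjs_range : ∀ j ∈ js, 0 ≤ j ∧ j < n := by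
    intro j hj
    have : j ∈ PySem.List.pyRange 0 n 1 := by
      rw [← hmapfst]; exact hsub.subset hj
    exact PySem.List.mem_pyRange_one.mp this
  -- B's output
  rw [pv_foldl_if_filterMap key
    (fun st p => (st.1 ++ PySem.List.pyRange (max st.2 (p - k)) (min (n - 1) (p + k) + 1) 1,
      max st.2 (p + k + 1)))]
  have hB := pv_bloop n k _ rfl js [] 0 hjs_pw hjs_range (by simp) (by simp) le_rfl
    (by intro y _ _ h _; omega)
  -- A's set
  set r : Int → List Int :=
    fun j => PySem.List.pyRange (max 0 (j - k)) (min (n - 1) (j + k) + 1) 1 with hr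
  set S : PySem.Set Int :=
    js.foldl (fun (s : PySem.Set Int) j => (r j).foldl PySem.Set.add s) PySem.Set.empty with hS
  have hSmem : ∀ x, x ∈ S ↔ ∃ j ∈ js, x ∈ r j := by
    intro x
    rw [hS, pv_mem_foldl_update]
    simp [PySem.Set.empty]
  have hSnodup : S.Nodup := pv_nodup_foldl_update r js PySem.Set.empty (by simp [PySem.Set.empty])
  set B := (js.foldl
    (fun (st : List Int × Int) p =>
      (st.1 ++ PySem.List.pyRange (max st.2 (p - k)) (min (n - 1) (p + k) + 1) 1,
       max st.2 (p + k + 1))) ([], 0)).1 with hBdef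
  have hBpw : B.Pairwise (· < ·) := hB.1
  have hBnodup : B.Nodup := hBpw.imp (fun h => ne_of_lt h)
  have hperm : B.Perm S := by
    rw [List.perm_ext_iff_of_nodup hBnodup hSnodup]
    intro x
    rw [hB.2 x, hSmem x]
    simp only [List.not_mem_nil, false_or, hr]
    constructor
    · rintro ⟨h0, h1, j, hj, h3, h4⟩
      exact ⟨j, hj, PySem.List.mem_pyRange_one.mpr (by omega)⟩
    · rintro ⟨j, hj, hm⟩
      have := PySem.List.mem_pyRange_one.mp hm
      exact ⟨by omega, by omega, j, hj, by omega, by omega⟩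
  exact PySem.List.sorted_eq_of_perm_of_pairwise_lt S B (fun x => x) hperm hBpw
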